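-- pv_equiv track=rewrite | github.com/s-eun-young-g/intro-programming-and-algos-archive | 6.1010/lisp_1/lisp_1_lab.py | tokenize
-- ===== SOURCE A (Python) =====
-- def no_more_comments(source):
--     """
--     Helper function to clean a source
--     of any comments.
--     """
--     # split into lines
--     lines = source.split("\n")
--     lines_without_comments = []
--
--     for line in lines:
--         # find() returns index of substring
--         # if found and -1 if not
--         comment_index = line.find(";")
--         if comment_index != -1:
--             line = line[:comment_index] # remove trailing comment
--         lines_without_comments.append(line)
--
--     clean_source = ""
--     for line in lines_without_comments:
--         clean_source = clean_source + line + "\n"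
--     return clean_source
--
-- def tokenize(source):
--     """
--     Splits an input string into meaningful tokens (left parens, right parens,
--     other whitespace-separated values).  Returns a list of strings.
--
--     Arguments:
--         source (str): a string containing the source code of a Scheme
--                       expression
--     """
--     clean_source = no_more_comments(source)
--     tokens = []
--     # current_token tracks of an accumulation
--     # of sequential characters
--     # as elements are either separated by whitespace
--     # or parentheses
--     current_token = ''
--     for char in clean_source:
--         if char == '(' or char == ')':
--             if current_token != '':
--                 tokens.append(current_token)
--                 current_token = ''
--             tokens.append(char)
--         elif char.isspace():
--             if current_token != '':
--                 tokens.append(current_token)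
--                 current_token = ''
--             # Ignore whitespace
--         else:
--             current_token += char  # Accumulate characters into current token
--     if current_token != '':
--         tokens.append(current_token)  # Add any remaining token
--     return tokens
-- ===== SOURCE B (Python) =====
-- def tokenize(source):
--     clean = "\n".join(line.split(";", 1)[0] for line in source.split("\n"))
--     padded = clean.replace("(", " ( ").replace(")", " ) ")
--     return padded.split()
-- ===== Notes on version B (the rewrite author's own statement) =====
-- stated objective: faster
-- what changed: Replaces A's Python-level char-by-char state machine with current_token accumulation by bulk string operations: strip each line at its first semicolon, join lines with newlines, pad parens with spaces via str.replace, and tokenize with a single whitespace str.split().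
import Mathlib
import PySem

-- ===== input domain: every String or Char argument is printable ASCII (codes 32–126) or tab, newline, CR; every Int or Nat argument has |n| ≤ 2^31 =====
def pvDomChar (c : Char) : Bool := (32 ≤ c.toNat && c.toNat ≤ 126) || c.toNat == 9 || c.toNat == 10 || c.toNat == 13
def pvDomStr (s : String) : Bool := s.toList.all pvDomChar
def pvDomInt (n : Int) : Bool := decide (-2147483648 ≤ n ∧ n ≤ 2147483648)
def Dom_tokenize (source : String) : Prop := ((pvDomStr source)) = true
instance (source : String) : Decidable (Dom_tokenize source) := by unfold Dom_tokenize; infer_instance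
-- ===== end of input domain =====

-- B replaces A's char-by-char state machine by comment stripping + paren padding + one whitespace split (idiomatic); return value proved equal.

-- ===== PORT A =====
-- comment_index = line.find(';'); line[:comment_index] if found
def pvStripA (line : List Char) : List Char :=
  let commentIndex := PySem.Chars.find line [';']
  if commentIndex ≠ -1 then PySem.Chars.slice line none (some commentIndex) else line

-- no_more_comments: split into lines, strip comments, re-concatenate adding '\n' after each line
def pvNoMoreComments (cs : List Char) : List Char :=
  let lines := PySem.Chars.splitOn cs ['\n']
  let linesWithoutComments := lines.map pvStripA
  linesWithoutComments.foldl (fun acc line => acc ++ line ++ ['\n']) []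

-- the body of A's `for char in clean_source` loop; state = (tokens, current_token)
def pvStepA (st : List (List Char) × List Char) (c : Char) : List (List Char) × List Char :=
  if c == '(' || c == ')' then
    ((if st.2.isEmpty then st.1 else st.1 ++ [st.2]) ++ [[c]], [])
  else if PySem.Chars.isspace c then
    (if st.2.isEmpty then st.1 else st.1 ++ [st.2], [])
  else (st.1, st.2 ++ [c])

def tokenize (source : String) : List String :=
  let clean := pvNoMoreComments source.toList
  let st := clean.foldl pvStepA ([], [])
  (if st.2.isEmpty then st.1 else st.1 ++ [st.2]).map String.ofList

-- ===== PORT B =====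
-- line.split(';', 1)[0]
def pvStripB (line : List Char) : List Char :=
  (PySem.Chars.splitOnMax line [';'] 1).headD []

-- "\n".join(strip each line); pad parens with spaces; split on whitespace
def tokenize_alt (source : String) : List String :=
  let clean := PySem.Chars.join ['\n'] ((PySem.Chars.splitOn source.toList ['\n']).map pvStripB)
  let padded := PySem.Chars.replace (PySem.Chars.replace clean ['('] [' ', '(', ' ']) [')'] [' ', ')', ' ']
  (PySem.Chars.split₀ padded).map String.ofList

-- ===== PRECONDITION & SPEC =====
def Spec_tokenize (source : String) (out : List String) : Prop := out = tokenize_alt source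
instance (source : String) (out : List String) : Decidable (Spec_tokenize source out) := by unfold Spec_tokenize; infer_instance

-- ===== CLAIM (what is proved, stated in full; the proofs are below) =====
def Claim_equal_tokenize : Prop := ∀ (source : String), Dom_tokenize source → Spec_tokenize source (tokenize source)

-- ===== LEMMAS AND PROOFS =====

-- str.replace with a single-char needle is a per-char flatMap
theorem pv_replace_go (c : Char) (new : List Char) :
    ∀ (l : List Char) (fuel : Nat) (acc : List Char), l.length ≤ fuel →
      PySem.Chars.replace.go [c] new fuel l acc
        = acc.reverse ++ l.flatMap (fun d => if d = c then new else [d]) := by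
  intro l
  induction l with
  | nil =>
    intro fuel acc _
    cases fuel <;> simp [PySem.Chars.replace.go]
  | cons d t ih =>
    intro fuel acc h
    cases fuel with
    | zero => simp at h
    | succ f =>
      by_cases hd : d = c
      · subst hd
        simp [PySem.Chars.replace.go, List.isPrefixOf, ih f (new.reverse ++ acc) (by simpa using h)]
      · simp [PySem.Chars.replace.go, List.isPrefixOf, hd,
          ih f (d :: acc) (by simpa using h), Ne.symm hd]

theorem pv_replace_single (l : List Char) (c : Char) (new : List Char) :
    PySem.Chars.replace l [c] new = l.flatMap (fun d => if d = c then new else [d]) := by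
  simp [PySem.Chars.replace, pv_replace_go c new l l.length [] le_rfl]

-- the combined effect of the two replaces, per character
def pvPadChar (d : Char) : List Char :=
  if d = '(' then [' ', '(', ' '] else if d = ')' then [' ', ')', ' '] else [d]

theorem pv_pad_eq (cs : List Char) :
    PySem.Chars.replace (PySem.Chars.replace cs ['('] [' ', '(', ' ']) [')'] [' ', ')', ' ']
      = cs.flatMap pvPadChar := by
  rw [pv_replace_single, pv_replace_single]
  induction cs with
  | nil => rfl
  | cons d t ih =>
    simp only [List.flatMap_cons, List.flatMap_append, ih]
    congr 1
    by_cases h1 : d = '('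
    · subst h1; decide
    · by_cases h2 : d = ')'
      · subst h2; decide
      · simp [pvPadChar, h1, h2]

-- find with needle ";" points at the first ';'
theorem pv_find_go (line : List Char) : ∀ (k : Nat),
    PySem.Chars.find.go [';'] line k
      = if ';' ∈ line then ((k : Int) + (line.takeWhile (· != ';')).length) else -1 := by
  induction line with
  | nil => intro k; simp [PySem.Chars.find.go]
  | cons d t ih =>
    intro k
    by_cases hd : d = ';'
    · subst hd; simp [PySem.Chars.find.go, List.isPrefixOf]
    · simp [PySem.Chars.find.go, List.isPrefixOf, hd, ih (k+1), Ne.symm hd]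
      by_cases hm : ';' ∈ t
      · simp [hm]; ring
      · simp [hm]

theorem pv_stripA_eq (line : List Char) : pvStripA line = line.takeWhile (· != ';') := by
  unfold pvStripA
  simp only [PySem.Chars.find, pv_find_go line 0]
  by_cases hm : ';' ∈ line
  · simp only [hm, if_true, Nat.cast_zero, zero_add]
    rw [if_pos (by simp)]
    show PySem.List.slice line none (some _) = _
    rw [PySem.List.slice_to line (by simp), Int.toNat_natCast]
    exact (List.prefix_iff_eq_take.mp (List.takeWhile_prefix _)).symm
  · simp only [hm, if_false]
    simp
    symm
    rw [List.takeWhile_eq_self_iff]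
    intro a ha
    simp
    rintro rfl
    exact hm ha

theorem pv_splitMax_go_zero : ∀ (fuel : Nat) (l cur : List Char) (acc : List (List Char)),
    PySem.Chars.splitOnMax.go [';'] fuel 0 l cur acc = ((cur.reverse ++ l) :: acc).reverse := by
  intro fuel l cur acc
  cases fuel with
  | zero => simp [PySem.Chars.splitOnMax.go]
  | succ f => cases l <;> simp [PySem.Chars.splitOnMax.go]

theorem pv_splitMax_go_one : ∀ (l : List Char) (fuel : Nat) (cur : List Char), l.length ≤ fuel →
    (PySem.Chars.splitOnMax.go [';'] fuel 1 l cur []).headD []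
      = cur.reverse ++ l.takeWhile (· != ';') := by
  intro l
  induction l with
  | nil =>
    intro fuel cur _
    cases fuel <;> simp [PySem.Chars.splitOnMax.go]
  | cons d t ih =>
    intro fuel cur h
    cases fuel with
    | zero => simp at h
    | succ f =>
      by_cases hd : d = ';'
      · subst hd
        simp [PySem.Chars.splitOnMax.go, List.isPrefixOf, pv_splitMax_go_zero]
      · have h2 := ih f (d :: cur) (by simpa using h)
        simp only [List.headD_eq_head?_getD] at h2 ⊢
        simp [PySem.Chars.splitOnMax.go, List.isPrefixOf, hd, Ne.symm hd, h2]

theorem pv_stripB_eq (line : List Char) : pvStripB line = line.takeWhile (· != ';') := by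
  unfold pvStripB
  rw [PySem.Chars.splitOnMax, if_neg (by norm_num)]
  simpa using pv_splitMax_go_one line (line.length + 1) [] (by omega)

theorem pv_splitOn_go_ne_nil (sep : List Char) : ∀ (fuel : Nat) (l cur : List Char)
    (acc : List (List Char)), PySem.Chars.splitOn.go sep fuel l cur acc ≠ [] := by
  intro fuel
  induction fuel with
  | zero => intro l cur acc; simp [PySem.Chars.splitOn.go]
  | succ f ih =>
    intro l cur acc
    cases l with
    | nil => simp [PySem.Chars.splitOn.go]
    | cons c rest =>
      rw [PySem.Chars.splitOn.go]
      split_ifs <;> apply ih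

theorem pv_foldl_clean : ∀ (ls : List (List Char)) (acc : List Char),
    ls.foldl (fun a l => a ++ l ++ ['\n']) acc = acc ++ ls.flatMap (· ++ ['\n']) := by
  intro ls
  induction ls with
  | nil => simp
  | cons a t ih => intro acc; rw [List.foldl_cons, ih]; simp [List.flatMap_cons]

theorem pv_flatMap_newline : ∀ (ls : List (List Char)), ls ≠ [] →
    ls.flatMap (· ++ ['\n']) = List.intercalate ['\n'] ls ++ ['\n'] := by
  intro ls
  induction ls with
  | nil => intro h; simp at h
  | cons a t ih =>
    intro _
    cases t with
    | nil => simp [List.intercalate]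
    | cons b t2 =>
      rw [List.flatMap_cons, ih (by simp)]
      simp [List.intercalate, List.intersperse]

-- A's state machine on cs equals split₀'s scanner on the padded text
theorem pv_machine : ∀ (cs : List Char) (toks : List (List Char)) (cur : List Char),
    (let st := cs.foldl pvStepA (toks, cur)
     if st.2.isEmpty then st.1 else st.1 ++ [st.2])
      = PySem.Chars.split₀.go (cs.flatMap pvPadChar) cur.reverse toks.reverse := by
  intro cs
  induction cs with
  | nil =>
    intro toks cur
    simp only [List.foldl_nil, List.flatMap_nil, PySem.Chars.split₀.go]
    cases cur <;> simp
  | cons c rest ih =>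
    intro toks cur
    have hsp : PySem.Chars.isspace ' ' = true := by decide
    by_cases h1 : c = '('
    · subst h1
      simp only [List.foldl_cons, List.flatMap_cons]
      rw [show pvStepA (toks, cur) '(' = ((if cur.isEmpty then toks else toks ++ [cur]) ++ [['(']], []) from by simp [pvStepA]]
      rw [show pvPadChar '(' = [' ', '(', ' '] from rfl]
      cases hc : cur.isEmpty <;>
        · simp only [PySem.Chars.split₀.go, List.cons_append, List.nil_append, hsp, hc,
            show PySem.Chars.isspace '(' = false from by decide,
            List.isEmpty_reverse, if_true, if_false, Bool.false_eq_true]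
          rw [ih]
          simp
    · by_cases h2 : c = ')'
      · subst h2
        simp only [List.foldl_cons, List.flatMap_cons]
        rw [show pvStepA (toks, cur) ')' = ((if cur.isEmpty then toks else toks ++ [cur]) ++ [[')']], []) from by simp [pvStepA]]
        rw [show pvPadChar ')' = [' ', ')', ' '] from rfl]
        cases hc : cur.isEmpty <;>
          · simp only [PySem.Chars.split₀.go, List.cons_append, List.nil_append, hsp, hc,
              show PySem.Chars.isspace ')' = false from by decide,
              List.isEmpty_reverse, if_true, if_false, Bool.false_eq_true]
            rw [ih]
            simp
      · by_cases h3 : PySem.Chars.isspace c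
        · simp only [List.foldl_cons, List.flatMap_cons]
          rw [show pvStepA (toks, cur) c = (if cur.isEmpty then toks else toks ++ [cur], []) from by simp [pvStepA, h1, h2, h3]]
          rw [show pvPadChar c = [c] from by simp [pvPadChar, h1, h2]]
          cases hc : cur.isEmpty <;>
            · simp only [List.singleton_append, PySem.Chars.split₀.go, h3, hc,
                List.isEmpty_reverse, if_true, if_false, Bool.false_eq_true]
              rw [ih]
              simp
        · simp only [List.foldl_cons, List.flatMap_cons]
          rw [show pvStepA (toks, cur) c = (toks, cur ++ [c]) from by simp [pvStepA, h1, h2, h3]]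
          rw [show pvPadChar c = [c] from by simp [pvPadChar, h1, h2]]
          simp only [List.singleton_append, PySem.Chars.split₀.go,
            show PySem.Chars.isspace c = false from by simpa using h3,
            if_false, Bool.false_eq_true]
          rw [ih]
          simp

-- a trailing whitespace char changes nothing for split₀'s scanner
theorem pv_trailing_space : ∀ (ys cur : List Char) (acc : List (List Char)),
    PySem.Chars.split₀.go (ys ++ ['\n']) cur acc = PySem.Chars.split₀.go ys cur acc := by
  intro ys
  induction ys with
  | nil =>
    intro cur acc
    cases hc : cur.isEmpty <;>
      simp_all [PySem.Chars.split₀.go, show PySem.Chars.isspace '\n' = true from by decide]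
  | cons c t ih =>
    intro cur acc
    by_cases h : PySem.Chars.isspace c
    · cases hc : cur.isEmpty <;> simp_all [PySem.Chars.split₀.go, List.cons_append]
    · simp_all [PySem.Chars.split₀.go, List.cons_append]

-- ===== VERDICT (by name: the statement is the Claim_ definition above) =====
theorem tokenize_spec : Claim_equal_tokenize := by
  intro source _
  unfold Spec_tokenize tokenize tokenize_alt pvNoMoreComments
  have hne : PySem.Chars.splitOn source.toList ['\n'] ≠ [] := by
    unfold PySem.Chars.splitOn; apply pv_splitOn_go_ne_nil
  have hmap : (PySem.Chars.splitOn source.toList ['\n']).map pvStripA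
      = (PySem.Chars.splitOn source.toList ['\n']).map pvStripB := by
    simp [pv_stripA_eq, pv_stripB_eq]
  have hclean : ((PySem.Chars.splitOn source.toList ['\n']).map pvStripA).foldl
        (fun acc line => acc ++ line ++ ['\n']) []
      = PySem.Chars.join ['\n'] ((PySem.Chars.splitOn source.toList ['\n']).map pvStripB)
        ++ ['\n'] := by
    rw [pv_foldl_clean, List.nil_append, hmap,
      pv_flatMap_newline _ (by simpa using hne)]
    rfl
  simp only []
  rw [hclean, pv_machine, pv_pad_eq, List.flatMap_append,
    show ([('\n' : Char)] : List Char).flatMap pvPadChar = ['\n'] from rfl,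
    pv_trailing_space]
  rfl
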